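-- pv_equiv track=rewrite | github.com/algrowth/algorithm-python | rbdus0715/string/kmp-01.py | getPrefixSuffix
-- ===== SOURCE A (Python) =====
-- def getPartialMatch(s):
--     strSize = len(s)
--     ret = [0] * strSize
--     j = 0
--     for i in range(1, strSize):
--         while j > 0 and s[i] != s[j]:
--             j = ret[j-1]
--         if s[i] == s[j]:
--             j += 1
--             ret[i] = j
--     return ret
--
-- def getPrefixSuffix(s):
--     ret = []
--     pi = getPartialMatch(s)
--     k = len(s)
--     while k > 0:
--         ret.append(k)
--         k = pi[k-1]
--     return ret
-- ===== SOURCE B (Python) =====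
-- def getPrefixSuffix(s):
--     n = len(s)
--     return [L for L in range(n, 0, -1) if s[:L] == s[n-L:]]
-- ===== Notes on version B (the rewrite author's own statement) =====
-- stated objective: simpler
-- what changed: Replaces the KMP failure-function computation plus chain-following with a one-line direct check: list every L from len(s) down to 1 whose length-L prefix equals its length-L suffix.
import Mathlib
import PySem

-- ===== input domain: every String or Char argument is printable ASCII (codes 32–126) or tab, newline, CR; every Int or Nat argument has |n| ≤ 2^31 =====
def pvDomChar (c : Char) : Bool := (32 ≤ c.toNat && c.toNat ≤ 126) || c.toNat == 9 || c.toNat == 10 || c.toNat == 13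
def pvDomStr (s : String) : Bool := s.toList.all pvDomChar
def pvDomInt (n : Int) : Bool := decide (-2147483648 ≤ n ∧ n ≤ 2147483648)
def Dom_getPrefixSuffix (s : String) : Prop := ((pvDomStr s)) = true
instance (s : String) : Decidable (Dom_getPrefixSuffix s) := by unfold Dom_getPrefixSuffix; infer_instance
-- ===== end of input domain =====

-- B replaces A's KMP failure-function + chain-following with a direct check of every prefix/suffix pair; objective: simpler.


-- ===== PORT A =====
-- inner 'while j > 0 and s[i] != s[j]: j = ret[j-1]'; fuel j.toNat suffices since every
-- step strictly decreases j (ret[j-1] < j holds throughout the real computation)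
def pmWhile (cs : List Char) (ret : List Int) (ci : Char) : Nat → Int → Int
  | 0, j => j
  | fuel + 1, j =>
    if 0 < j ∧ PySem.List.pyGetD cs j ' ' ≠ ci then
      pmWhile cs ret ci fuel (PySem.List.pyGetD ret (j - 1) 0)
    else j

-- one iteration of 'for i in range(1, strSize)' over the state (ret, j)
def pmStep (cs : List Char) (st : List Int × Int) (i : Int) : List Int × Int :=
  let ret := st.1
  let j := pmWhile cs ret (PySem.List.pyGetD cs i ' ') st.2.toNat st.2
  if PySem.List.pyGetD cs i ' ' = PySem.List.pyGetD cs j ' ' then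
    (PySem.List.pySetD ret i (j + 1), j + 1)
  else (ret, j)

def getPartialMatch (s : String) : List Int :=
  let cs := s.toList
  ((PySem.List.pyRange 1 cs.length 1).foldl (pmStep cs) (List.replicate cs.length 0, 0)).1

-- 'while k > 0: ret.append(k); k = pi[k-1]'; fuel len+1 suffices since k strictly decreases
def psWhile (pi : List Int) : Nat → Int → List Int → List Int
  | 0, _, acc => acc
  | fuel + 1, k, acc =>
    if 0 < k then psWhile pi fuel (PySem.List.pyGetD pi (k - 1) 0) (acc ++ [k]) else acc

def getPrefixSuffix (s : String) : List Int :=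
  let pi := getPartialMatch s
  psWhile pi (s.toList.length + 1) (s.toList.length : Int) []

-- ===== PORT B =====
def getPrefixSuffix_alt (s : String) : List Int :=
  let cs := s.toList
  let n : Int := cs.length
  (PySem.List.pyRange n 0 (-1)).filter
    (fun L => PySem.List.slice cs none (some L) = PySem.List.slice cs (some (n - L)) none)

-- ===== PRECONDITION & SPEC =====
def Spec_getPrefixSuffix (s : String) (out : List Int) : Prop := out = getPrefixSuffix_alt s
instance (s : String) (out : List Int) : Decidable (Spec_getPrefixSuffix s out) := by unfold Spec_getPrefixSuffix; infer_instance

-- ===== CLAIM (what is proved, stated in full; the proofs are below) =====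
def Claim_equal_getPrefixSuffix : Prop := ∀ (s : String), Dom_getPrefixSuffix s → Spec_getPrefixSuffix s (getPrefixSuffix s)

-- ===== LEMMAS AND PROOFS =====

-- L is a (not necessarily proper) border length of cs: prefix of length L = suffix of length L
abbrev IsBorder (cs : List Char) (L : Nat) : Prop :=
  L ≤ cs.length ∧ cs.take L = cs.drop (cs.length - L)

-- longest proper border length of a list ('pi' value of the KMP failure function)
def lbp (cs : List Char) : Nat :=
  Nat.findGreatest (fun L => cs.take L = cs.drop (cs.length - L)) (cs.length - 1)

theorem border_zero (cs : List Char) : IsBorder cs 0 := by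
  simp [IsBorder]

theorem border_full (cs : List Char) : IsBorder cs cs.length := by
  simp [IsBorder]

theorem lbp_lt (cs : List Char) (h : 0 < cs.length) : lbp cs < cs.length := by
  have h1 := Nat.findGreatest_le (P := fun L => cs.take L = cs.drop (cs.length - L)) (cs.length - 1)
  have h2 : lbp cs ≤ cs.length - 1 := h1
  omega

theorem lbp_isBorder (cs : List Char) : IsBorder cs (lbp cs) := by
  have h0 : cs.take 0 = cs.drop (cs.length - 0) := by simp
  have hb := Nat.findGreatest_spec (P := fun L => cs.take L = cs.drop (cs.length - L))
      (Nat.zero_le (cs.length - 1)) h0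
  have hle := Nat.findGreatest_le (P := fun L => cs.take L = cs.drop (cs.length - L)) (cs.length - 1)
  have hle' : lbp cs ≤ cs.length - 1 := hle
  exact ⟨by omega, hb⟩

theorem le_lbp (cs : List Char) (L : Nat) (hL : L < cs.length) (hb : IsBorder cs L) :
    L ≤ lbp cs := Nat.le_findGreatest (by omega) hb.2

theorem lbp_eq (u : List Char) (r : Nat) (hr : IsBorder u r) (hrlt : r < u.length)
    (hmax : ∀ L, L < u.length → IsBorder u L → L ≤ r) : lbp u = r :=
  Nat.le_antisymm (hmax _ (lbp_lt u (by omega)) (lbp_isBorder u)) (le_lbp u r hrlt hr)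

theorem border_take_iff (cs : List Char) (k L : Nat) (hk : IsBorder cs k) (hL : L ≤ k) :
    IsBorder (cs.take k) L ↔ IsBorder cs L := by
  obtain ⟨hkn, hkb⟩ := hk
  have hlen : (cs.take k).length = k := by rw [List.length_take]; omega
  have h1 : (cs.take k).take L = cs.take L := by rw [List.take_take]; congr 1; omega
  have h2 : (cs.take k).drop (k - L) = cs.drop (cs.length - L) := by
    rw [hkb, List.drop_drop]; congr 1; omega
  simp only [IsBorder, hlen, h1, h2]
  constructor
  · rintro ⟨-, h⟩; exact ⟨hL.trans hkn, h⟩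
  · rintro ⟨-, h⟩; exact ⟨hL, h⟩

theorem snoc_inj (A B : List Char) (a b : Char) (h : A.length = B.length) :
    (A ++ [a] = B ++ [b]) ↔ (A = B ∧ a = b) := by
  constructor
  · intro hh; exact ⟨(List.append_inj hh h).1, by simpa using (List.append_inj hh h).2⟩
  · rintro ⟨rfl, rfl⟩; rfl

theorem border_snoc (cs : List Char) (m L : Nat) (hm : m < cs.length) (hL : L ≤ m) :
    IsBorder (cs.take (m+1)) (L+1) ↔
      IsBorder (cs.take m) L ∧ cs.getD L ' ' = cs.getD m ' ' := by
  have hLn : L < cs.length := lt_of_le_of_lt (by omega) hm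
  have hulen : (cs.take m).length = m := by rw [List.length_take]; omega
  have hu1len : (cs.take (m+1)).length = m + 1 := by rw [List.length_take]; omega
  have hsplit : cs.take (m+1) = cs.take m ++ [cs.getD m ' '] := by
    rw [List.getD_eq_getElem _ _ hm]; exact List.take_succ_eq_append_getElem hm
  have htake : (cs.take (m+1)).take (L+1) = cs.take L ++ [cs.getD L ' '] := by
    rw [List.take_take]
    have hmin : min (L+1) (m+1) = L + 1 := by omega
    rw [hmin, List.getD_eq_getElem _ _ hLn]; exact List.take_succ_eq_append_getElem hLn
  have hdrop : (cs.take (m+1)).drop (m + 1 - (L+1)) =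
      (cs.take m).drop (m - L) ++ [cs.getD m ' '] := by
    rw [hsplit]
    have h' : m + 1 - (L+1) = m - L := by omega
    rw [h']
    exact List.drop_append_of_le_length (by omega)
  have hutake : (cs.take m).take L = cs.take L := by rw [List.take_take]; congr 1; omega
  have happ := snoc_inj (cs.take L) ((cs.take m).drop (m - L)) (cs.getD L ' ') (cs.getD m ' ')
    (by rw [List.length_take, List.length_drop, hulen]; omega)
  simp only [IsBorder, hu1len, hulen, htake, hdrop, hutake]
  constructor
  · rintro ⟨-, h⟩
    obtain ⟨h1, h2⟩ := happ.mp h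
    exact ⟨⟨hL, h1⟩, h2⟩
  · rintro ⟨⟨-, h1⟩, h2⟩
    exact ⟨by omega, happ.mpr ⟨h1, h2⟩⟩

-- characterization of the failure value for the extended prefix
theorem lbp_succ_eq (cs : List Char) (m r : Nat) (hm : m < cs.length)
    (hrm : r < m) (hrb : IsBorder (cs.take m) r)
    (hstop : r = 0 ∨ cs.getD r ' ' = cs.getD m ' ')
    (hmax : ∀ L, L < m → IsBorder (cs.take m) L → cs.getD L ' ' = cs.getD m ' ' → L ≤ r) :
    lbp (cs.take (m+1)) =
      if cs.getD r ' ' = cs.getD m ' ' then r + 1 else 0 := by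
  have hu1len : (cs.take (m+1)).length = m + 1 := by rw [List.length_take]; omega
  by_cases heq : cs.getD r ' ' = cs.getD m ' '
  · rw [if_pos heq]
    apply lbp_eq
    · exact (border_snoc cs m r hm (by omega)).mpr ⟨hrb, heq⟩
    · omega
    · intro L hLlt hLb
      rw [hu1len] at hLlt
      match L, hLb with
      | 0, _ => omega
      | (L' + 1), hLb =>
        obtain ⟨hb', hc'⟩ := (border_snoc cs m L' hm (by omega)).mp hLb
        have := hmax L' (by omega) hb' hc'
        omega
  · rw [if_neg heq]
    have hr0 : r = 0 := by rcases hstop with h | h; exact h; exact absurd h heq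
    apply lbp_eq
    · exact border_zero _
    · omega
    · intro L hLlt hLb
      rw [hu1len] at hLlt
      match L, hLb with
      | 0, _ => omega
      | (L' + 1), hLb =>
        obtain ⟨hb', hc'⟩ := (border_snoc cs m L' hm (by omega)).mp hLb
        have hL'0 : L' = 0 := by have := hmax L' (by omega) hb' hc'; omega
        subst hL'0
        subst hr0
        exact absurd hc' heq

-- getD helpers
theorem getD_replicate_zero (n i : Nat) : (List.replicate n (0 : Int)).getD i 0 = 0 := by
  rcases Nat.lt_or_ge i n with h | h
  · rw [List.getD_eq_getElem _ _ (by simpa using h)]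
    simp
  · rw [List.getD_eq_default _ _ (by simpa using h)]

theorem getD_set_eq (l : List Int) (m : Nat) (v : Int) (h : m < l.length) :
    (l.set m v).getD m 0 = v := by
  have h' : m < (l.set m v).length := by simpa using h
  rw [List.getD_eq_getElem _ _ h']
  exact List.getElem_set_self h'

theorem getD_set_ne (l : List Int) (m i : Nat) (v : Int) (h : i ≠ m) :
    (l.set m v).getD i 0 = l.getD i 0 := by
  rcases Nat.lt_or_ge i l.length with hlt | hge
  · rw [List.getD_eq_getElem _ _ (by simpa using hlt),
        List.getD_eq_getElem _ _ hlt]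
    rw [List.getElem_set_ne (by omega)]
  · rw [List.getD_eq_default _ _ (by simpa using hge),
        List.getD_eq_default _ _ hge]

theorem pmStep_eq (cs : List Char) (st : List Int × Int) (i : Int) :
    pmStep cs st i =
      if PySem.List.pyGetD cs i ' '
          = PySem.List.pyGetD cs (pmWhile cs st.1 (PySem.List.pyGetD cs i ' ') st.2.toNat st.2) ' '
      then (PySem.List.pySetD st.1 i (pmWhile cs st.1 (PySem.List.pyGetD cs i ' ') st.2.toNat st.2 + 1),
            pmWhile cs st.1 (PySem.List.pyGetD cs i ' ') st.2.toNat st.2 + 1)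
      else (st.1, pmWhile cs st.1 (PySem.List.pyGetD cs i ' ') st.2.toNat st.2) := rfl

-- the inner while loop finds the longest border of cs.take m that is followed by cs[m]
theorem pmWhile_spec (cs : List Char) (ret : List Int) (m : Nat) (hm : m < cs.length)
    (hret : ∀ i, i < m → ret.getD i 0 = (lbp (cs.take (i+1)) : Int)) :
    ∀ j : Nat, j ≤ m → IsBorder (cs.take m) j → ∀ fuel : Nat, j ≤ fuel →
    ∃ r : Nat, pmWhile cs ret (cs.getD m ' ') fuel (j : Int) = (r : Int) ∧
      r ≤ j ∧ IsBorder (cs.take m) r ∧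
      (r = 0 ∨ cs.getD r ' ' = cs.getD m ' ') ∧
      (∀ L, L ≤ j → IsBorder (cs.take m) L → cs.getD L ' ' = cs.getD m ' ' → L ≤ r) := by
  intro j
  induction j using Nat.strong_induction_on with
  | _ j ih =>
    intro hjm hjb fuel hfuel
    by_cases hj0 : j = 0
    · subst hj0
      refine ⟨0, ?_, le_refl _, border_zero _, Or.inl rfl, ?_⟩
      · cases fuel with
        | zero => simp [pmWhile]
        | succ f => simp [pmWhile]
      · intro L hL _ _; omega
    · cases fuel with
      | zero => omega
      | succ f =>
        have hjpos : (0 : Int) < (j : Int) := by exact_mod_cast Nat.pos_of_ne_zero hj0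
        have hjn : j < cs.length := by omega
        have hcsj : PySem.List.pyGetD cs (j : Int) ' ' = cs.getD j ' ' := by
          simp [PySem.List.pyGetD_natCast]
        by_cases hc : cs.getD j ' ' = cs.getD m ' '
        · refine ⟨j, ?_, le_refl _, hjb, Or.inr hc, ?_⟩
          · simp only [pmWhile]
            rw [if_neg]
            rintro ⟨-, hne⟩
            exact hne (by rw [hcsj, hc])
          · intro L hL _ _; omega
        · -- recurse: j := ret[j-1] = lbp (cs.take j)
          have hj1 : ((j : Int) - 1) = ((j - 1 : Nat) : Int) := by omega
          have hretj : PySem.List.pyGetD ret ((j : Int) - 1) 0 =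
              (lbp (cs.take j) : Int) := by
            rw [hj1, PySem.List.pyGetD_natCast]
            have := hret (j - 1) (by omega)
            rwa [Nat.sub_add_cancel (Nat.pos_of_ne_zero hj0)] at this
          set jn := lbp (cs.take j) with hjn_def
          have htjlen : (cs.take j).length = j := by rw [List.length_take]; omega
          have hjnlt : jn < j := by
            have := lbp_lt (cs.take j) (by omega)
            omega
          have htt : (cs.take m).take j = cs.take j := by
            rw [List.take_take]; congr 1; omega
          have hjnb : IsBorder (cs.take m) jn := by
            rw [← border_take_iff (cs.take m) j jn hjb (by omega), htt]
            exact lbp_isBorder (cs.take j)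
          obtain ⟨r, hreq, hrle, hrb, hrstop, hrmax⟩ :=
            ih jn hjnlt (by omega) hjnb f (by omega)
          refine ⟨r, ?_, by omega, hrb, hrstop, ?_⟩
          · simp only [pmWhile]
            rw [if_pos ⟨hjpos, by rw [hcsj]; exact hc⟩, hretj]
            exact hreq
          · intro L hL hLb hLc
            have hLj : L < j := by
              rcases Nat.lt_or_ge L j with h | h
              · exact h
              · exfalso; have : L = j := by omega
                subst this; exact hc hLc
            have hLjn : L ≤ jn := by
              have hLb' : IsBorder (cs.take j) L := by
                rw [← htt, border_take_iff (cs.take m) j L hjb (by omega)]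
                exact hLb
              exact le_lbp (cs.take j) L (by omega) hLb'
            exact hrmax L hLjn hLb hLc

-- the state of A's failure-function loop after the first m iterations
def pmRun (cs : List Char) (m : Nat) : List Int × Int :=
  (PySem.List.pyRange 1 (m : Int) 1).foldl (pmStep cs) (List.replicate cs.length 0, 0)

theorem lbp_small (u : List Char) (h : u.length ≤ 1) : lbp u = 0 := by
  unfold lbp
  have : u.length - 1 = 0 := by omega
  rw [this, Nat.findGreatest_zero]

theorem pm_inv (cs : List Char) : ∀ m : Nat, m ≤ cs.length →
    (pmRun cs m).1.length = cs.length ∧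
    (∀ i : Nat, i < m → (pmRun cs m).1.getD i 0 = (lbp (cs.take (i+1)) : Int)) ∧
    (∀ i : Nat, m ≤ i → (pmRun cs m).1.getD i 0 = 0) ∧
    (pmRun cs m).2 = (lbp (cs.take m) : Int) := by
  intro m
  induction m with
  | zero =>
    intro _
    have h0 : pmRun cs 0 = (List.replicate cs.length 0, 0) := by
      unfold pmRun
      rw [PySem.List.pyRange_one_eq_nil (by omega)]
      rfl
    rw [h0]
    refine ⟨by simp, by omega, fun i _ => getD_replicate_zero _ _, ?_⟩
    simp [lbp_small]
  | succ m ihm =>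
    intro hmn
    have ih := ihm (by omega)
    by_cases hm0 : m = 0
    · subst hm0
      have h1 : pmRun cs 1 = pmRun cs 0 := by
        unfold pmRun
        rw [PySem.List.pyRange_one_eq_nil (by omega), PySem.List.pyRange_one_eq_nil (by omega)]
      rw [h1]
      obtain ⟨ihl, _, ihz, ihj⟩ := ih
      refine ⟨ihl, ?_, fun i hi => ihz i (by omega), ?_⟩
      · intro i hi
        have hi0 : i = 0 := by omega
        subst hi0
        rw [ihz 0 (le_refl _)]
        have : lbp (cs.take 1) = 0 := lbp_small _ (by rw [List.length_take]; omega)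
        simp [this]
      · rw [ihj]
        have h1 : lbp (cs.take 1) = 0 := lbp_small _ (by rw [List.length_take]; omega)
        have h0 : lbp (cs.take 0) = 0 := lbp_small _ (by simp)
        rw [h1, h0]
    · -- m ≥ 1
      have hstep : pmRun cs (m+1) = pmStep cs (pmRun cs m) (m : Int) := by
        unfold pmRun
        have hcast : ((m : Int) + 1) = ((m + 1 : Nat) : Int) := by omega
        rw [← hcast, PySem.List.pyRange_one_succ_right (by omega), List.foldl_append]
        rfl
      obtain ⟨ihl, ihv, ihz, ihj⟩ := ih
      set st := pmRun cs m with hst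
      set j0 := lbp (cs.take m) with hj0
      have hmlt : m < cs.length := by omega
      have hj0m : j0 < m := by
        have := lbp_lt (cs.take m) (by rw [List.length_take]; omega)
        rw [List.length_take] at this
        omega
      have hj0b : IsBorder (cs.take m) j0 := lbp_isBorder (cs.take m)
      obtain ⟨r, hreq, hrle, hrb, hrstop, hrmax⟩ :=
        pmWhile_spec cs st.1 m hmlt ihv j0 (by omega) hj0b j0 (le_refl _)
      have hmax' : ∀ L, L < m → IsBorder (cs.take m) L →
          cs.getD L ' ' = cs.getD m ' ' → L ≤ r := by
        intro L hLm hLb hLc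
        have : L ≤ j0 := le_lbp (cs.take m) L (by rw [List.length_take]; omega) hLb
        exact hrmax L this hLb hLc
      have hlbp := lbp_succ_eq cs m r hmlt (by omega) hrb hrstop hmax'
      have hpm : pmWhile cs st.1 (PySem.List.pyGetD cs (m : Int) ' ') st.2.toNat st.2
          = (r : Int) := by
        rw [ihj, PySem.List.pyGetD_natCast]
        simpa using hreq
      have hcond : (PySem.List.pyGetD cs (m : Int) ' ' = PySem.List.pyGetD cs ((r : Int)) ' ')
          ↔ cs.getD r ' ' = cs.getD m ' ' := by
        rw [PySem.List.pyGetD_natCast, PySem.List.pyGetD_natCast]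
        exact eq_comm
      rw [hstep, pmStep_eq, hpm]
      by_cases hcr : cs.getD r ' ' = cs.getD m ' '
      · rw [if_pos (hcond.mpr hcr)]
        have hlbp' : lbp (cs.take (m+1)) = r + 1 := by rw [hlbp, if_pos hcr]
        have hset : PySem.List.pySetD st.1 (m : Int) ((r : Int) + 1)
            = st.1.set m ((r : Int) + 1) := by
          rw [PySem.List.pySetD_natCast]
        refine ⟨?_, ?_, ?_, ?_⟩
        · show (PySem.List.pySetD st.1 (m : Int) ((r : Int) + 1)).length = cs.length
          rw [hset, List.length_set]; exact ihl
        · intro i hi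
          show (PySem.List.pySetD st.1 (m : Int) ((r : Int) + 1)).getD i 0
              = (lbp (cs.take (i+1)) : Int)
          rw [hset]
          rcases Nat.lt_or_ge i m with him | him
          · rw [getD_set_ne _ _ _ _ (by omega)]
            exact ihv i him
          · have him' : i = m := by omega
            rw [him', getD_set_eq _ _ _ (by omega), hlbp']
            omega
        · intro i hi
          show (PySem.List.pySetD st.1 (m : Int) ((r : Int) + 1)).getD i 0 = 0
          rw [hset, getD_set_ne _ _ _ _ (by omega)]
          exact ihz i (by omega)
        · show ((r : Int) + 1) = (lbp (cs.take (m+1)) : Int)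
          rw [hlbp']
          omega
      · rw [if_neg (fun h => hcr (hcond.mp h))]
        have hr0 : r = 0 := by rcases hrstop with h | h; exact h; exact absurd h hcr
        have hlbp' : lbp (cs.take (m+1)) = 0 := by rw [hlbp, if_neg hcr]
        refine ⟨ihl, ?_, fun i hi => ihz i (by omega), ?_⟩
        · intro i hi
          show st.1.getD i 0 = (lbp (cs.take (i+1)) : Int)
          rcases Nat.lt_or_ge i m with him | him
          · exact ihv i him
          · have him' : i = m := by omega
            rw [him', ihz m (le_refl _), hlbp']
            simp
        · show (r : Int) = (lbp (cs.take (m+1)) : Int)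
          rw [hlbp', hr0]

-- descending list of all nonzero border lengths ≤ k
def blist (cs : List Char) : Nat → List Int
  | 0 => []
  | k + 1 => (if IsBorder cs (k+1) then [((k + 1 : Nat) : Int)] else []) ++ blist cs k

theorem blist_gap (cs : List Char) : ∀ a b : Nat, b ≤ a →
    (∀ L, b < L → L ≤ a → ¬ IsBorder cs L) → blist cs a = blist cs b := by
  intro a
  induction a with
  | zero => intro b hb _; have : b = 0 := by omega
            subst this; rfl
  | succ a iha =>
    intro b hb hgap
    rcases Nat.eq_or_lt_of_le hb with h | h
    · rw [h]
    · have hnb : ¬ IsBorder cs (a+1) := hgap (a+1) (by omega) (le_refl _)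
      show (if IsBorder cs (a+1) then [((a + 1 : Nat) : Int)] else []) ++ blist cs a = blist cs b
      rw [if_neg hnb, List.nil_append]
      exact iha b (by omega) (fun L h1 h2 => hgap L h1 (by omega))

theorem psWhile_run (cs : List Char) (pi : List Int)
    (hpi : ∀ i : Nat, i < cs.length → pi.getD i 0 = (lbp (cs.take (i+1)) : Int)) :
    ∀ k : Nat, k ≤ cs.length → IsBorder cs k → ∀ fuel : Nat, k < fuel → ∀ acc : List Int,
      psWhile pi fuel (k : Int) acc = acc ++ blist cs k := by
  intro k
  induction k using Nat.strong_induction_on with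
  | _ k ih =>
    intro hkn hkb fuel hfuel acc
    cases fuel with
    | zero => omega
    | succ f =>
      by_cases hk0 : k = 0
      · subst hk0
        simp [psWhile, blist]
      · have hkpos : (0 : Int) < (k : Int) := by exact_mod_cast Nat.pos_of_ne_zero hk0
        have hk1 : ((k : Int) - 1) = ((k - 1 : Nat) : Int) := by omega
        have hpik : PySem.List.pyGetD pi ((k : Int) - 1) 0 = (lbp (cs.take k) : Int) := by
          rw [hk1, PySem.List.pyGetD_natCast]
          have := hpi (k-1) (by omega)
          rwa [Nat.sub_add_cancel (Nat.pos_of_ne_zero hk0)] at this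
        set k' := lbp (cs.take k) with hk'
        have htklen : (cs.take k).length = k := by rw [List.length_take]; omega
        have hk'lt : k' < k := by
          have := lbp_lt (cs.take k) (by omega)
          omega
        have hk'b : IsBorder cs k' := by
          rw [← border_take_iff cs k k' hkb (by omega)]
          exact lbp_isBorder (cs.take k)
        have hrec : psWhile pi (f+1) (k : Int) acc
            = psWhile pi f (k' : Int) (acc ++ [(k : Int)]) := by
          simp only [psWhile]
          rw [if_pos hkpos, hpik]
        rw [hrec, ih k' hk'lt (by omega) hk'b f (by omega) (acc ++ [(k : Int)])]
        rw [List.append_assoc]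
        congr 1
        -- [k] ++ blist cs k' = blist cs k
        obtain ⟨k'', rfl⟩ : ∃ k'', k = k'' + 1 := ⟨k - 1, by omega⟩
        show ((k'' + 1 : Nat) : Int) :: blist cs k'
            = (if IsBorder cs (k''+1) then [((k'' + 1 : Nat) : Int)] else []) ++ blist cs k''
        rw [if_pos hkb, List.singleton_append]
        congr 1
        symm
        apply blist_gap cs k'' k' (by omega)
        intro L h1 h2 hLb
        have hLk : L < k'' + 1 := by omega
        have : IsBorder (cs.take (k''+1)) L := by
          rw [border_take_iff cs (k''+1) L hkb (by omega)]
          exact hLb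
        have := le_lbp (cs.take (k''+1)) L (by omega) this
        omega

-- B's filter over the countdown range is exactly blist
theorem alt_blist (cs : List Char) : ∀ k : Nat, k ≤ cs.length →
    (PySem.List.pyRange (k : Int) 0 (-1)).filter
      (fun L => PySem.List.slice cs none (some L)
        = PySem.List.slice cs (some ((cs.length : Int) - L)) none)
    = blist cs k := by
  intro k
  induction k with
  | zero =>
    intro _
    rw [PySem.List.pyRange_neg_one_eq_nil (by omega)]
    rfl
  | succ k ihk =>
    intro hkn
    have hcons : PySem.List.pyRange ((k+1 : Nat) : Int) 0 (-1)
        = ((k+1 : Nat) : Int) :: PySem.List.pyRange ((k : Nat) : Int) 0 (-1) := by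
      have harg : ((k+1 : Nat) : Int) - 1 = ((k : Nat) : Int) := by omega
      rw [PySem.List.pyRange_neg_one_cons (by omega), harg]
    rw [hcons, List.filter_cons]
    have hsl1 : PySem.List.slice cs none (some ((k+1 : Nat) : Int)) = cs.take (k+1) := by
      rw [PySem.List.slice_to_natCast]
    have hsl2 : PySem.List.slice cs (some ((cs.length : Int) - ((k+1 : Nat) : Int))) none
        = cs.drop (cs.length - (k+1)) := by
      have : ((cs.length : Int) - ((k+1 : Nat) : Int)) = ((cs.length - (k+1) : Nat) : Int) := by
        omega
      rw [this, PySem.List.slice_from_natCast]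
    by_cases hb : IsBorder cs (k+1)
    · have hdec : (decide (PySem.List.slice cs none (some ((k+1 : Nat) : Int))
          = PySem.List.slice cs (some ((cs.length : Int) - ((k+1 : Nat) : Int))) none)) = true := by
        rw [decide_eq_true_iff, hsl1, hsl2]
        exact hb.2
      rw [hdec]
      show ((k+1 : Nat) : Int) :: _ = blist cs (k+1)
      rw [ihk (by omega)]
      show _ = (if IsBorder cs (k+1) then [((k + 1 : Nat) : Int)] else []) ++ blist cs k
      rw [if_pos hb, List.singleton_append]
    · have hdec : (decide (PySem.List.slice cs none (some ((k+1 : Nat) : Int))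
          = PySem.List.slice cs (some ((cs.length : Int) - ((k+1 : Nat) : Int))) none)) = false := by
        rw [decide_eq_false_iff_not, hsl1, hsl2]
        intro h
        exact hb ⟨by omega, h⟩
      rw [hdec]
      show List.filter _ _ = blist cs (k+1)
      rw [ihk (by omega)]
      show _ = (if IsBorder cs (k+1) then [((k + 1 : Nat) : Int)] else []) ++ blist cs k
      rw [if_neg hb, List.nil_append]

-- ===== VERDICT (by name: the statement is the Claim_ definition above) =====
theorem getPrefixSuffix_spec : Claim_equal_getPrefixSuffix := by
  intro s _
  show getPrefixSuffix s = getPrefixSuffix_alt s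
  have hAdef : getPrefixSuffix s
      = psWhile (pmRun s.toList s.toList.length).1 (s.toList.length + 1)
          (s.toList.length : Int) [] := rfl
  have hBdef : getPrefixSuffix_alt s
      = (PySem.List.pyRange (s.toList.length : Int) 0 (-1)).filter
          (fun L => PySem.List.slice s.toList none (some L)
            = PySem.List.slice s.toList (some ((s.toList.length : Int) - L)) none) := rfl
  obtain ⟨hlen, hv, -, -⟩ := pm_inv s.toList s.toList.length (le_refl _)
  have hA := psWhile_run s.toList (pmRun s.toList s.toList.length).1 hv
      s.toList.length (le_refl _) (border_full _) (s.toList.length + 1) (by omega) []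
  have hB := alt_blist s.toList s.toList.length (le_refl _)
  rw [hAdef, hA, hBdef, hB, List.nil_append]
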